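-- pv_equiv track=rewrite | github.com/Ashiq-am/Path-of-Python | 1.Python Basics/Python Basics Articles/Check if all the 1s in a binary string are equidistant or not in Python/2.Early Exit Strategy.py | are_1s_equidistant_early_exit
-- ===== SOURCE A (Python) =====
-- def are_1s_equidistant_early_exit(s):
--     # initialise previous index and distance
--     prev_index = -1
--     distance = None
--     # iterate over the string
--     for i, char in enumerate(s):
--         if char == '1':
--             # update previous index for the first occurence
--             if prev_index == -1:
--                 prev_index = i
--             else:
--                 # calculate current dustance
--                 current_distance = i - prev_index
--                 # update distance for the first occurence
--                 if distance is None: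
--                     distance = current_distance
--                 # compare distance with current distance
--                 elif distance != current_distance:
--                     return False
--                 # update previous index
--                 prev_index = i
--     return True
-- ===== SOURCE B (Python) =====
-- def are_1s_equidistant_early_exit(s):
--     positions = [i for i, char in enumerate(s) if char == '1']
--     gaps = [b - a for a, b in zip(positions, positions[1:])]
--     return len(set(gaps)) <= 1
-- ===== Notes on version B (the rewrite author's own statement) =====
-- stated objective: simpler
-- what changed: Replaces A's single stateful scan (prev_index/distance state with early return) by two stateless phases: gather the indices of '1's, then test that the set of consecutive gaps has at most one element.
import Mathlib
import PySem

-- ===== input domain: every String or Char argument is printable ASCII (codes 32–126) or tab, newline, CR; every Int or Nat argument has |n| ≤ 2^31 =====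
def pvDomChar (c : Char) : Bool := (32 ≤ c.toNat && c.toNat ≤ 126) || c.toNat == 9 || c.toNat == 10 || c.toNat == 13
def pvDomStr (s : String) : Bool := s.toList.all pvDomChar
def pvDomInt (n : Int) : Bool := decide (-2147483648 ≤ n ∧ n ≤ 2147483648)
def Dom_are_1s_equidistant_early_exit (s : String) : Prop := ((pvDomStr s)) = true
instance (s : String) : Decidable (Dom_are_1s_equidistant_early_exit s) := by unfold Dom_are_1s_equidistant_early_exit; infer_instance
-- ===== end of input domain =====

-- B replaces A's single stateful scan (prev_index/distance with early return) by two
-- stateless phases — gather the '1' positions, then check the set of consecutive gaps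
-- has at most one element — for simplicity; both are O(n), no speed claim.

-- ===== PORT A =====
-- the for-loop of A: state = (prev_index, distance); returning false models 'return False'
def pvLoopA : List (Int × Char) → Int → Option Int → Bool
  | [], _, _ => true
  | (i, c) :: rest, prev, dist =>
    if c = '1' then
      if prev = -1 then pvLoopA rest i dist
      else
        let cur := i - prev
        match dist with
        | none => pvLoopA rest i (some cur)
        | some d => if d ≠ cur then false else pvLoopA rest i (some cur)
    else pvLoopA rest prev dist

def are_1s_equidistant_early_exit (s : String) : Bool :=
  pvLoopA (PySem.List.enumerate s.toList 0) (-1) none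

-- ===== PORT B =====
def are_1s_equidistant_early_exit_alt (s : String) : Bool :=
  let positions := ((PySem.List.enumerate s.toList 0).filter (fun p => p.2 = '1')).map (·.1)
  let gaps := (positions.zip (positions.drop 1)).map (fun p => p.2 - p.1)
  decide ((PySem.Set.ofList gaps).length ≤ 1)

-- ===== PRECONDITION & SPEC =====
def Spec_are_1s_equidistant_early_exit (s : String) (out : Bool) : Prop := out = are_1s_equidistant_early_exit_alt s
instance (s : String) (out : Bool) : Decidable (Spec_are_1s_equidistant_early_exit s out) := by unfold Spec_are_1s_equidistant_early_exit; infer_instance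

-- ===== CLAIM (what is proved, stated in full; the proofs are below) =====
def Claim_equal_are_1s_equidistant_early_exit : Prop := ∀ (s : String), Dom_are_1s_equidistant_early_exit s → Spec_are_1s_equidistant_early_exit s (are_1s_equidistant_early_exit s)

-- ===== LEMMAS AND PROOFS =====

-- A's loop seen on the list of '1'-positions only
def pvChk : List Int → Int → Option Int → Bool
  | [], _, _ => true
  | p :: ps, prev, dist =>
    if prev = -1 then pvChk ps p dist
    else
      let cur := p - prev
      match dist with
      | none => pvChk ps p (some cur)
      | some d => if d ≠ cur then false else pvChk ps p (some cur)

def pvGaps (ps : List Int) : List Int := (ps.zip (ps.drop 1)).map (fun p => p.2 - p.1)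

theorem pvLoopA_eq_chk (l : List Char) (k prev : Int) (dist : Option Int) :
    pvLoopA (PySem.List.enumerate l k) prev dist
      = pvChk (((PySem.List.enumerate l k).filter (fun p => p.2 = '1')).map (·.1)) prev dist := by
  induction l generalizing k prev dist with
  | nil => simp [PySem.List.enumerate_nil, pvLoopA, pvChk]
  | cons c l ih =>
    rw [PySem.List.enumerate_cons]
    by_cases hc : c = '1' <;> simp [pvLoopA, pvChk, hc, List.filter]
    · by_cases hp : prev = -1
      · simp [hp, ih]
      · simp [hp]
        cases dist with
        | none => simp [ih]
        | some d =>
          by_cases hd : d = k - prev <;> simp [hd, ih]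
    · exact ih _ _ _

theorem pvGaps_cons (a b : Int) (l : List Int) :
    pvGaps (a :: b :: l) = (b - a) :: pvGaps (b :: l) := rfl

theorem pvChk_some (ps : List Int) (prev d : Int) (hprev : 0 ≤ prev)
    (hps : ∀ p ∈ ps, (0:Int) ≤ p) :
    pvChk ps prev (some d) = (pvGaps (prev :: ps)).all (fun g => g = d) := by
  induction ps generalizing prev d with
  | nil => simp [pvChk, pvGaps]
  | cons p ps ih =>
    have hpne : prev ≠ -1 := by omega
    have hp : (0:Int) ≤ p := hps p (by simp)
    rw [pvGaps_cons]
    by_cases hd : d = p - prev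
    · subst hd
      simp [pvChk, hpne, ih p (p - prev) hp (fun q hq => hps q (by simp [hq]))]
    · simp [pvChk, hpne, hd]
      intro h; omega

-- length of a PySem set never shrinks below the start under foldl add
theorem pvFoldlAdd_len_mono {α : Type} [BEq α] (l : List α) (s : PySem.Set α) :
    s.length ≤ (l.foldl PySem.Set.add s).length := by
  induction l generalizing s with
  | nil => simp
  | cons x l ih =>
    have h1 : s.length ≤ (PySem.Set.add s x).length := by
      unfold PySem.Set.add
      split <;> simp
    exact le_trans h1 (ih _)

theorem pvSet_singleton_le_one (l : List Int) (a : Int) :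
    ((l.foldl PySem.Set.add [a]).length ≤ 1) ↔ (∀ x ∈ l, x = a) := by
  induction l generalizing a with
  | nil => simp
  | cons x l ih =>
    by_cases hx : x = a
    · subst hx
      have : PySem.Set.add [x] x = [x] := by
        unfold PySem.Set.add PySem.Set.contains
        simp
      simp [List.foldl, ih]
    · have hadd : PySem.Set.add [a] x = [a, x] := by
        unfold PySem.Set.add PySem.Set.contains
        simp [hx]
      have hmono := pvFoldlAdd_len_mono l ([a, x] : PySem.Set Int)
      constructor
      · intro h
        exfalso
        rw [List.foldl, hadd] at h
        simp at hmono; omega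
      · intro h
        exact absurd (h x (by simp)) hx

theorem pvSet_ofList_le_one (gs : List Int) :
    decide ((PySem.Set.ofList gs).length ≤ 1)
      = match gs with
        | [] => true
        | a :: l => l.all (fun g => g = a) := by
  cases gs with
  | nil => simp [PySem.Set.ofList]
  | cons a l =>
    have h0 : PySem.Set.ofList (a :: l) = l.foldl PySem.Set.add [a] := by
      rw [PySem.Set.ofList_eq_foldl]
      rfl
    rw [h0]
    by_cases h : ∀ x ∈ l, x = a
    · simp [(pvSet_singleton_le_one l a).2 h]
      exact h
    · have hlen := (not_iff_not.2 (pvSet_singleton_le_one l a)).2 h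
      push Not at h
      simp [hlen]
      exact h

theorem pvPositions_nonneg (l : List Char) (p : Int)
    (hp : p ∈ ((PySem.List.enumerate l 0).filter (fun q => q.2 = '1')).map (·.1)) :
    (0:Int) ≤ p := by
  simp only [List.mem_map, List.mem_filter] at hp
  obtain ⟨q, ⟨hq, _⟩, hq1⟩ := hp
  rw [PySem.List.mem_enumerate_iff] at hq
  obtain ⟨k, hk, rfl⟩ := hq
  simp at hq1
  omega

-- ===== VERDICT (by name: the statement is the Claim_ definition above) =====
theorem are_1s_equidistant_early_exit_spec : Claim_equal_are_1s_equidistant_early_exit := by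
  intro s _
  unfold Spec_are_1s_equidistant_early_exit are_1s_equidistant_early_exit are_1s_equidistant_early_exit_alt
  rw [pvLoopA_eq_chk]
  set ps := ((PySem.List.enumerate s.toList 0).filter (fun p => p.2 = '1')).map (·.1) with hps
  have hnn : ∀ p ∈ ps, (0:Int) ≤ p := fun p hp => pvPositions_nonneg s.toList p (hps ▸ hp)
  show pvChk ps (-1) none
      = decide ((PySem.Set.ofList ((ps.zip (ps.drop 1)).map (fun p => p.2 - p.1))).length ≤ 1)
  rw [show (ps.zip (ps.drop 1)).map (fun p => p.2 - p.1) = pvGaps ps from rfl]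
  match ps, hnn with
  | [], _ => simp [pvChk, pvGaps, PySem.Set.ofList]
  | [p], _ => simp [pvChk, pvGaps, PySem.Set.ofList]
  | p :: q :: rest, hnn =>
    have hp : (0:Int) ≤ p := hnn p (by simp)
    have hq : (0:Int) ≤ q := hnn q (by simp)
    have hpne : p ≠ -1 := by omega
    rw [pvSet_ofList_le_one]
    rw [pvGaps_cons]
    show pvChk (q :: rest) p none = (pvGaps (q :: rest)).all (fun g => g = q - p)
    have : pvChk (q :: rest) p none = pvChk rest q (some (q - p)) := by
      simp [pvChk, hpne]
    rw [this, pvChk_some rest q (q - p) hq (fun r hr => hnn r (by simp [hr]))]
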